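-- pv_equiv track=rewrite | github.com/bsouha/Implementation-des-algorithms-cryptographiques | Elliptic_Curve_Cryptography_ECC.py | generate_elliptic_curve
-- ===== SOURCE A (Python) =====
-- def generate_elliptic_curve(a, b, mod):
--     if (4 * a**3 + 27 * b**2) % mod == 0:
--         raise ValueError("Invalid parameters for elliptic curve")
--     points = {}
--     for x in range(mod):
--         for y in range(mod):
--             if (y**2 - x**3 - a * x - b) % mod == 0:
--                 points[(x, y)] = None
--     points[(0, 0)] = None  # Add the point at infinity
--     return points
-- ===== SOURCE B (Python) =====
-- def generate_elliptic_curve(a, b, mod):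
--     disc = 4 * a * a * a + 27 * b * b
--     if disc % mod == 0:
--         raise ValueError("Invalid parameters for elliptic curve")
--     # group the residues y*y % mod once, then one lookup per x
--     pairs = [(y * y % mod, y) for y in range(mod)]
--     roots = {}
--     for r, y in pairs:
--         roots.setdefault(r, []).append(y)
--     points = {}
--     for x in range(mod):
--         for y in roots.get((x * x * x + a * x + b) % mod, []):
--             points[(x, y)] = None
--     points[(0, 0)] = None
--     return points
-- ===== Notes on version B (the rewrite author's own statement) =====
-- stated objective: faster
-- what changed: Instead of testing every (x,y) pair with a nested loop, B groups the residues y*y % mod into a dict in one pass over y, then for each x looks up the right-hand side (x^3+ax+b) % mod, emitting only actual points.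
import Mathlib
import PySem

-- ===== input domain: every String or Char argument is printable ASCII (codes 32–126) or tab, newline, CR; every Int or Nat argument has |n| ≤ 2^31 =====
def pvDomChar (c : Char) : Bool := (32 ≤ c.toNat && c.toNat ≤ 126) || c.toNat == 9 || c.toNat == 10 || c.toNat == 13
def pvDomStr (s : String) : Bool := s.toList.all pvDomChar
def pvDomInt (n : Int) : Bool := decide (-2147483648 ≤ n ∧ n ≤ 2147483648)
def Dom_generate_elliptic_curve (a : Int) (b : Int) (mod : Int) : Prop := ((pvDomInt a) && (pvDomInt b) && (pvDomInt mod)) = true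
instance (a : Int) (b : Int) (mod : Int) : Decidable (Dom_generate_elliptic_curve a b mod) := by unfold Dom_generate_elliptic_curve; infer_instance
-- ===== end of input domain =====

-- B replaces A's O(mod^2) double membership scan by grouping the residues y*y % mod
-- once and doing one lookup per x (measured faster; asymptotically O(mod + #points)).

-- ===== PORT A =====
-- the ValueError path ('raise') is excluded by Pre_; the port returns [] there
def generate_elliptic_curve (a : Int) (b : Int) (mod : Int) : List (Int × Int × Option Int) :=
  if PySem.Int.mod (4 * a ^ 3 + 27 * b ^ 2) mod = 0 then []
  else
    let points : PySem.Dict (Int × Int) (Option Int) :=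
      (PySem.List.pyRange 0 mod 1).foldl (fun points x =>
        (PySem.List.pyRange 0 mod 1).foldl (fun points y =>
          if PySem.Int.mod (y ^ 2 - x ^ 3 - a * x - b) mod = 0 then
            points.insert (x, y) none
          else points) points) PySem.Dict.empty
    let points := points.insert (0, 0) none
    -- dict[(int,int), None] rendered as the flattened association list (type convention)
    points.items.map (fun p => (p.1.1, p.1.2, p.2))

-- ===== PORT B =====
-- [(y*y % mod, y) for y in range(mod)]
def gecPairs (mod : Int) : List (Int × Int) :=
  (PySem.List.pyRange 0 mod 1).map (fun y => (PySem.Int.mod (y * y) mod, y))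

def generate_elliptic_curve_alt (a : Int) (b : Int) (mod : Int) : List (Int × Int × Option Int) :=
  let disc := 4 * a * a * a + 27 * b * b
  if PySem.Int.mod disc mod = 0 then []
  else
    -- roots.setdefault(r, []).append(y) mutates the stored list in place: exactly Dict.modify r [] (· ++ [y])
    let roots : PySem.Dict Int (List Int) :=
      (gecPairs mod).foldl (fun d p => d.modify p.1 [] (· ++ [p.2])) PySem.Dict.empty
    let points : PySem.Dict (Int × Int) (Option Int) :=
      (PySem.List.pyRange 0 mod 1).foldl (fun pts x =>
        (roots.getD (PySem.Int.mod (x * x * x + a * x + b) mod) []).foldl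
          (fun pts y => pts.insert (x, y) none) pts) PySem.Dict.empty
    let points := points.insert (0, 0) none
    points.items.map (fun p => (p.1.1, p.1.2, p.2))

-- ===== PRECONDITION & SPEC =====
-- Pre_ excludes exactly the inputs where the Python A raises: mod = 0 (ZeroDivisionError)
-- and (4a^3+27b^2) % mod == 0 (the explicit ValueError).
def Pre_generate_elliptic_curve (a : Int) (b : Int) (mod : Int) : Prop :=
  mod ≠ 0 ∧ PySem.Int.mod (4 * a ^ 3 + 27 * b ^ 2) mod ≠ 0
instance (a : Int) (b : Int) (mod : Int) : Decidable (Pre_generate_elliptic_curve a b mod) := by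
  unfold Pre_generate_elliptic_curve; infer_instance

def pvWitness_generate_elliptic_curve : Int × Int × Int := (2, 3, 7)

def Spec_generate_elliptic_curve (a : Int) (b : Int) (mod : Int) (out : List (Int × Int × Option Int)) : Prop := out = generate_elliptic_curve_alt a b mod
instance (a : Int) (b : Int) (mod : Int) (out : List (Int × Int × Option Int)) : Decidable (Spec_generate_elliptic_curve a b mod out) := by unfold Spec_generate_elliptic_curve; infer_instance

-- ===== CLAIM (what is proved, stated in full; the proofs are below) =====
def Claim_equal_generate_elliptic_curve : Prop := ∀ (a : Int) (b : Int) (mod : Int), Dom_generate_elliptic_curve a b mod → Pre_generate_elliptic_curve a b mod → Spec_generate_elliptic_curve a b mod (generate_elliptic_curve a b mod)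

-- ===== LEMMAS AND PROOFS =====

-- Python-mod congruence: two ints have the same residue iff the modulus divides their difference.
theorem gec_mod_eq_iff (u v m : Int) (hm : m ≠ 0) :
    PySem.Int.mod u m = PySem.Int.mod v m ↔ m ∣ (u - v) := by
  have hu := PySem.Int.floordiv_mul_add_mod u m
  have hv := PySem.Int.floordiv_mul_add_mod v m
  have d1 : m ∣ (u - PySem.Int.mod u m) := ⟨PySem.Int.floordiv u m, by linarith⟩
  have d2 : m ∣ (v - PySem.Int.mod v m) := ⟨PySem.Int.floordiv v m, by linarith⟩
  constructor
  · intro h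
    have : u - v = (u - PySem.Int.mod u m) - (v - PySem.Int.mod v m) := by rw [h]; ring
    rw [this]; exact dvd_sub d1 d2
  · intro h
    have hd : m ∣ (PySem.Int.mod u m - PySem.Int.mod v m) := by
      have : PySem.Int.mod u m - PySem.Int.mod v m
           = (u - v) - ((u - PySem.Int.mod u m) - (v - PySem.Int.mod v m)) := by ring
      rw [this]; exact dvd_sub h (dvd_sub d1 d2)
    rcases lt_or_gt_of_ne hm with hneg | hpos
    · have b1 := PySem.Int.mod_neg_bounds u hneg
      have b2 := PySem.Int.mod_neg_bounds v hneg
      have := Int.eq_zero_of_dvd_of_natAbs_lt_natAbs hd (by omega)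
      omega
    · have b1 := PySem.Int.mod_nonneg u hpos
      have b2 := PySem.Int.mod_lt u hpos
      have b3 := PySem.Int.mod_nonneg v hpos
      have b4 := PySem.Int.mod_lt v hpos
      have := Int.eq_zero_of_dvd_of_natAbs_lt_natAbs hd (by omega)
      omega

-- A's membership test agrees with B's residue comparison.
theorem gec_cond_equiv (a b mod x y : Int) (hm : mod ≠ 0) :
    (PySem.Int.mod (y ^ 2 - x ^ 3 - a * x - b) mod = 0)
      ↔ PySem.Int.mod (y * y) mod = PySem.Int.mod (x * x * x + a * x + b) mod := by
  rw [PySem.Int.mod_eq_zero_iff_dvd, gec_mod_eq_iff _ _ _ hm]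
  constructor <;> (intro ⟨c, hc⟩; exact ⟨c, by linarith⟩)

-- a fold guarded by an if equals the fold over the filtered list
theorem gec_foldl_ite_filter {α β : Type} (l : List α) (p : α → Prop) [DecidablePred p]
    (g : β → α → β) (d : β) :
    l.foldl (fun d y => if p y then g d y else d) d
      = (l.filter (fun y => decide (p y))).foldl g d := by
  induction l generalizing d with
  | nil => rfl
  | cons h t ih =>
      by_cases hp : p h <;> simp [hp, ih]

-- B's grouped dict looked up at r is exactly the filtered y-range
theorem gec_roots_getD (mod r : Int) :
    ((gecPairs mod).foldl (fun d p => d.modify p.1 [] (· ++ [p.2]))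
        (PySem.Dict.empty : PySem.Dict Int (List Int))).getD r []
      = (PySem.List.pyRange 0 mod 1).filter (fun y => PySem.Int.mod (y * y) mod == r) := by
  rw [PySem.Dict.getD_foldl_modify_append]
  simp [gecPairs, List.filter_map, Function.comp_def]

-- ===== VERDICT (by name: the statement is the Claim_ definition above) =====
theorem generate_elliptic_curve_spec : Claim_equal_generate_elliptic_curve := by
  intro a b mod _ hpre
  obtain ⟨hm, hdisc⟩ := hpre
  unfold Spec_generate_elliptic_curve generate_elliptic_curve generate_elliptic_curve_alt
  have hdisc' : PySem.Int.mod (4 * a * a * a + 27 * b * b) mod ≠ 0 := by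
    have : 4 * a * a * a + 27 * b * b = 4 * a ^ 3 + 27 * b ^ 2 := by ring
    rw [this]; exact hdisc
  rw [if_neg hdisc, if_neg hdisc']
  have hinner : ∀ (pts : PySem.Dict (Int × Int) (Option Int)) (x : Int),
      (PySem.List.pyRange 0 mod 1).foldl (fun points y =>
          if PySem.Int.mod (y ^ 2 - x ^ 3 - a * x - b) mod = 0 then
            points.insert (x, y) none
          else points) pts
        = (((gecPairs mod).foldl (fun d p => d.modify p.1 [] (· ++ [p.2]))
             (PySem.Dict.empty : PySem.Dict Int (List Int))).getD
               (PySem.Int.mod (x * x * x + a * x + b) mod) []).foldl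
            (fun pts y => pts.insert (x, y) none) pts := by
    intro pts x
    rw [gec_foldl_ite_filter, gec_roots_getD]
    congr 1
    apply List.filter_congr
    intro y _
    rw [Bool.eq_iff_iff]
    simp [gec_cond_equiv a b mod x y hm]
  simp only [hinner]
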